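-- pv_equiv track=rewrite | github.com/TheGammaSqueeze/GammaOSDistribution | hardware/google/gchips/gralloc4/src/core/align_structs.py | fix_offsets
-- ===== SOURCE A (Python) =====
-- def has_an_offset(c):
-- 	return (c == "{") or (c == ",")
--
-- def fix_offsets(line, target_offsets):
-- 	ret = ""
-- 	offset_index = 0
-- 	offset = -1
-- 	for c in line:
-- 		offset = offset + 1
-- 		ret = ret + c
-- 		if has_an_offset(c):
-- 			ret = ret + " " * (target_offsets[offset_index] - offset)
-- 			offset_index = offset_index + 1
-- 			offset = 0
-- 	return ret
-- ===== SOURCE B (Python) =====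
-- def fix_offsets(line, target_offsets):
--     # Locate every trigger ('{' or ',') once, then assemble the output from
--     # slices: the k-th padding is target_offsets[k] minus the distance from
--     # the previous trigger (the line start for the first one).
--     positions = [i for i, c in enumerate(line) if c == "{" or c == ","]
--     pieces = []
--     start = 0
--     last = 0
--     for k, p in enumerate(positions):
--         pieces.append(line[start:p + 1])
--         pieces.append(" " * (target_offsets[k] - (p - last)))
--         start = p + 1
--         last = p
--     pieces.append(line[start:])
--     return "".join(pieces)
-- ===== Notes on version B (the rewrite author's own statement) =====
-- stated objective: alternative
-- what changed: Instead of one character-by-character loop threading an offset counter and growing the result string, B first computes the list of trigger positions, then assembles the output from line slices and padding computed from distances between consecutive trigger positions.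
import Mathlib
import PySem

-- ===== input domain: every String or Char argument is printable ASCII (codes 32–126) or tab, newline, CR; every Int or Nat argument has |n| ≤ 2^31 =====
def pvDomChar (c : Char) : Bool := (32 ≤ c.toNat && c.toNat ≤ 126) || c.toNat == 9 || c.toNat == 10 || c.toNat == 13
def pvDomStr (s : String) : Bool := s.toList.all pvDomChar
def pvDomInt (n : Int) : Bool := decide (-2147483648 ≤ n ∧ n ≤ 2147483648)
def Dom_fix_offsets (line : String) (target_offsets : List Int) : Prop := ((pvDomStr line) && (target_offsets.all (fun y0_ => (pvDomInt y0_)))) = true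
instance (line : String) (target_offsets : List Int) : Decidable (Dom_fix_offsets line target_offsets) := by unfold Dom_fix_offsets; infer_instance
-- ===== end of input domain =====

-- B assembles the output from trigger positions and line slices instead of A's
-- per-character loop; alternative decomposition, same result (return value only).


-- ===== PORT A =====
def has_an_offset (c : Char) : Bool := (c == '{') || (c == ',')

-- loop body of A; state = (ret, offset_index, offset); " " * n is empty for n ≤ 0, hence .toNat
def fixA_step (tgt : List Int) (st : List Char × Nat × Int) (c : Char) : List Char × Nat × Int :=
  let ret := st.1
  let oi := st.2.1
  let off := st.2.2 + 1
  let ret := ret ++ [c]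
  if has_an_offset c then
    (ret ++ List.replicate ((PySem.List.pyGetD tgt (oi : Int) 0) - off).toNat ' ', oi + 1, 0)
  else
    (ret, oi, off)

def fix_offsets (line : String) (target_offsets : List Int) : String :=
  String.ofList (line.toList.foldl (fixA_step target_offsets) ([], 0, -1)).1

-- ===== PORT B =====
-- loop body of B; state = (pieces, start, last)
def fixB_step (cs : List Char) (tgt : List Int) (st : List (List Char) × Int × Int)
    (kp : Int × Int) : List (List Char) × Int × Int :=
  let pieces := st.1
  let start := st.2.1
  let last := st.2.2
  let k := kp.1
  let p := kp.2
  let pieces := pieces ++ [PySem.List.slice cs (some start) (some (p + 1))]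
  let pieces := pieces ++ [List.replicate ((PySem.List.pyGetD tgt k 0) - (p - last)).toNat ' ']
  (pieces, p + 1, p)

def fix_offsets_alt (line : String) (target_offsets : List Int) : String :=
  let cs := line.toList
  let positions := (PySem.List.enumerate cs 0).filterMap
    (fun ic => if ic.2 == '{' || ic.2 == ',' then some ic.1 else none)
  let st := (PySem.List.enumerate positions 0).foldl (fixB_step cs target_offsets) ([], 0, 0)
  String.ofList ((st.1 ++ [PySem.List.slice cs (some st.2.1) none]).flatten)

-- ===== PRECONDITION & SPEC =====
-- A raises IndexError when the line has more '{'/',' triggers than target_offsets has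
-- entries; exactly those inputs are excluded (B raises there too).
def Pre_fix_offsets (line : String) (target_offsets : List Int) : Prop :=
  (line.toList.filter (fun c => c == '{' || c == ',')).length ≤ target_offsets.length
instance (line : String) (target_offsets : List Int) : Decidable (Pre_fix_offsets line target_offsets) := by unfold Pre_fix_offsets; infer_instance

def pvWitness_fix_offsets : String × List Int := ("a{b, c}", [5, 9])

def Spec_fix_offsets (line : String) (target_offsets : List Int) (out : String) : Prop := out = fix_offsets_alt line target_offsets
instance (line : String) (target_offsets : List Int) (out : String) : Decidable (Spec_fix_offsets line target_offsets out) := by unfold Spec_fix_offsets; infer_instance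

-- ===== CLAIM (what is proved, stated in full; the proofs are below) =====
def Claim_equal_fix_offsets : Prop := ∀ (line : String) (target_offsets : List Int), Dom_fix_offsets line target_offsets → Pre_fix_offsets line target_offsets → Spec_fix_offsets line target_offsets (fix_offsets line target_offsets)

-- ===== LEMMAS AND PROOFS =====

-- reference forms of the two loops
def runA (tgt : List Int) : List Char → List Char → Nat → Int → List Char
  | [], ret, _, _ => ret
  | c :: cs, ret, oi, off =>
    if has_an_offset c then
      runA tgt cs (ret ++ [c] ++ List.replicate ((PySem.List.pyGetD tgt (oi : Int) 0) - (off + 1)).toNat ' ') (oi + 1) 0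
    else
      runA tgt cs (ret ++ [c]) oi (off + 1)

def runB (tgt : List Int) (cs : List Char) : List Int → Int → Int → Int → List Char
  | [], _, start, _ => PySem.List.slice cs (some start) none
  | p :: ps, k, start, last =>
    PySem.List.slice cs (some start) (some (p + 1))
      ++ List.replicate ((PySem.List.pyGetD tgt k 0) - (p - last)).toNat ' '
      ++ runB tgt cs ps (k + 1) (p + 1) p

def tp (cs : List Char) (s : Int) : List Int :=
  (PySem.List.enumerate cs s).filterMap
    (fun ic => if ic.2 == '{' || ic.2 == ',' then some ic.1 else none)

theorem foldA_eq_runA (tgt : List Int) (cs : List Char) (ret : List Char) (oi : Nat) (off : Int) :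
    (cs.foldl (fixA_step tgt) (ret, oi, off)).1 = runA tgt cs ret oi off := by
  induction cs generalizing ret oi off with
  | nil => rfl
  | cons c cs ih =>
    simp only [List.foldl_cons, fixA_step, runA]
    by_cases h : has_an_offset c <;> simp [h, ih]

theorem runA_append (tgt : List Int) (cs : List Char) :
    ∀ (r1 r2 : List Char) (oi : Nat) (off : Int),
      runA tgt cs (r1 ++ r2) oi off = r1 ++ runA tgt cs r2 oi off := by
  induction cs with
  | nil => intros; simp [runA]
  | cons c cs ih =>
    intro r1 r2 oi off
    simp only [runA]
    by_cases h : has_an_offset c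
    · rw [if_pos h, if_pos h]
      simp only [List.append_assoc]
      rw [ih]
    · rw [if_neg h, if_neg h]
      simp only [List.append_assoc]
      rw [ih]

theorem runA_acc (tgt : List Int) (cs : List Char) (ret : List Char) (oi : Nat) (off : Int) :
    runA tgt cs ret oi off = ret ++ runA tgt cs [] oi off := by
  have := runA_append tgt cs ret [] oi off
  simpa using this

theorem foldB_eq_runB (tgt : List Int) (cs : List Char) (ps : List Int)
    (pieces : List (List Char)) (k start last : Int) :
    (let st := (PySem.List.enumerate ps k).foldl (fixB_step cs tgt) (pieces, start, last)
     (st.1 ++ [PySem.List.slice cs (some st.2.1) none]).flatten)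
      = pieces.flatten ++ runB tgt cs ps k start last := by
  induction ps generalizing pieces k start last with
  | nil => simp [PySem.List.enumerate_nil, runB]
  | cons p ps ih =>
    simp only [PySem.List.enumerate_cons, List.foldl_cons, runB]
    rw [show fixB_step cs tgt (pieces, start, last) (k, p)
        = (pieces ++ [PySem.List.slice cs (some start) (some (p + 1))]
            ++ [List.replicate ((PySem.List.pyGetD tgt k 0) - (p - last)).toNat ' '], p + 1, p) from rfl]
    rw [ih]
    simp

theorem tp_cons (c : Char) (cs : List Char) (s : Int) :
    tp (c :: cs) s = (if c == '{' || c == ',' then [s] else []) ++ tp cs (s + 1) := by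
  simp only [tp, PySem.List.enumerate_cons, List.filterMap_cons]
  by_cases h : (c == '{' || c == ',') = true <;> simp [h]

theorem tp_shift (cs : List Char) (s : Int) :
    tp cs (s + 1) = (tp cs s).map (· + 1) := by
  induction cs generalizing s with
  | nil => simp [tp]
  | cons c cs ih =>
    rw [tp_cons, tp_cons]
    by_cases h : (c == '{' || c == ',') = true <;> simp [h, ih]

theorem tp_le (cs : List Char) (s : Int) : ∀ p ∈ tp cs s, s ≤ p := by
  induction cs generalizing s with
  | nil => simp [tp]
  | cons c cs ih =>
    intro p hp
    rw [tp_cons] at hp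
    by_cases h : (c == '{' || c == ',') = true <;> simp [h] at hp
    · rcases hp with h1 | h1
      · omega
      · have := ih (s + 1) p h1; omega
    · have := ih (s + 1) p hp; omega

-- peel the head character off the first slice when start = 0
theorem runB_peel (tgt : List Int) (c : Char) (cs : List Char) (ps : List Int) (k last : Int)
    (hps : ∀ p ∈ ps, 0 ≤ p) :
    runB tgt (c :: cs) ps k 0 last = c :: runB tgt (c :: cs) ps k 1 last := by
  cases ps with
  | nil =>
    simp only [runB]
    rw [PySem.List.slice_from _ (by omega), PySem.List.slice_from _ (by omega)]
    simp
  | cons p ps =>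
    have hp : 0 ≤ p := hps p (by simp)
    simp only [runB]
    rw [PySem.List.slice_toNat _ (by omega) (by omega), PySem.List.slice_toNat _ (by omega) (by omega)]
    have h1 : (p + 1).toNat = p.toNat + 1 := by omega
    simp [h1, List.take_succ_cons]

-- shift the whole computation by one character
theorem runB_shift (tgt : List Int) (c : Char) (cs : List Char) (ps : List Int)
    (k a l : Int) (ha : 0 ≤ a) (hps : ∀ p ∈ ps, 0 ≤ p) :
    runB tgt (c :: cs) (ps.map (· + 1)) k (a + 1) (l + 1) = runB tgt cs ps k a l := by
  induction ps generalizing k a l with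
  | nil =>
    simp only [List.map_nil, runB]
    rw [PySem.List.slice_from _ (by omega), PySem.List.slice_from _ (by omega)]
    have : (a + 1).toNat = a.toNat + 1 := by omega
    simp [this]
  | cons p ps ih =>
    have hp : 0 ≤ p := hps p (by simp)
    simp only [List.map_cons, runB]
    rw [PySem.List.slice_toNat _ (by omega) (by omega), PySem.List.slice_toNat _ (by omega) (by omega)]
    have e1 : (p + 1 + 1).toNat = (p + 1).toNat + 1 := by omega
    have e2 : (a + 1).toNat = a.toNat + 1 := by omega
    have e3 : p + 1 - (l + 1) = p - l := by ring
    rw [e1, e2, e3]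
    have := ih (k + 1) (p + 1) p (by omega) (fun q hq => hps q (by simp [hq]))
    rw [show p + 1 + 1 = (p + 1) + 1 from by ring] at this
    simp [this, List.drop_succ_cons]

theorem main_lemma (tgt : List Int) (cs : List Char) :
    ∀ (oi : Nat) (g : Int),
      runA tgt cs [] oi g = runB tgt cs (tp cs 0) (oi : Int) 0 (-(g + 1)) := by
  induction cs with
  | nil =>
    intro oi g
    simp only [runA, tp, PySem.List.enumerate_nil, List.filterMap_nil, runB]
    rw [PySem.List.slice_from _ (by omega)]
    simp
  | cons c cs ih =>
    intro oi g
    have hle : ∀ p ∈ tp cs 1, (0 : Int) ≤ p := by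
      intro p hp; have := tp_le cs 1 p hp; omega
    have hle0 : ∀ p ∈ tp cs 0, (0 : Int) ≤ p := tp_le cs 0
    have e01 : (0 : Int) + 1 = 1 := by norm_num
    rw [tp_cons, e01]
    by_cases h : (c == '{' || c == ',') = true
    · -- trigger character
      have hA : has_an_offset c = true := by simpa [has_an_offset] using h
      have hshift := runB_shift tgt c cs (tp cs 0) ((oi : Int) + 1) 0 (-1) (by omega) hle0
      have e5 : (-1 + 1 : Int) = 0 := by norm_num
      rw [← tp_shift cs 0, e01, e5] at hshift
      simp only [runA, hA, if_true, h, List.nil_append]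
      rw [runA_acc]
      simp only [List.singleton_append, runB]
      have hsl : PySem.List.slice (c :: cs) (some 0) (some (0 + 1)) = [c] := by
        rw [PySem.List.slice_toNat _ (by omega) (by omega)]; simp
      have e2 : (0 : Int) - -(g + 1) = g + 1 := by ring
      rw [hsl, e2, e01, hshift, ih (oi + 1) 0]
      push_cast
      norm_num
    · -- ordinary character
      have hA : has_an_offset c = false := by
        simp only [has_an_offset]; simpa using h
      simp only [runA, hA, Bool.false_eq_true, if_false, h, List.nil_append]
      rw [runA_acc, ih oi (g + 1)]
      rw [runB_peel tgt c cs (tp cs 1) (oi : Int) (-(g + 1)) hle]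
      have hshift := runB_shift tgt c cs (tp cs 0) (oi : Int) 0 (-(g + 1 + 1)) (by omega) hle0
      have e4 : (-(g + 1 + 1) + 1 : Int) = -(g + 1) := by ring
      rw [← tp_shift cs 0, e01, e4] at hshift
      rw [hshift]
      simp

-- ===== VERDICT (by name: the statement is the Claim_ definition above) =====
theorem fix_offsets_spec : Claim_equal_fix_offsets := by
  intro line tgt _ _
  show fix_offsets line tgt = fix_offsets_alt line tgt
  unfold fix_offsets fix_offsets_alt
  rw [foldA_eq_runA]
  have hB := foldB_eq_runB tgt line.toList (tp line.toList 0) [] 0 0 0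
  simp only [tp] at hB ⊢
  rw [hB]
  have := main_lemma tgt line.toList 0 (-1)
  simp only [tp] at this
  rw [this]
  norm_num
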